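-- pv_equiv track=rewrite | github.com/Faustze/OOP_Python_Stepik | review_the_basic_constructs/dartboard.py | make_dartboard
-- ===== SOURCE A (Python) =====
-- def make_dartboard(n):
--     dartboard = [[0] * n for _ in range(n)]
--     step = 1
--     while step < n - step:
--         for row in range(step, n - step):
--             for column in range(step, n - step):
--                 dartboard[row][column] += 1
--         step += 1
--     return dartboard
-- ===== SOURCE B (Python) =====
-- def make_dartboard(n):
--     return [[min(r, c, n - 1 - r, n - 1 - c) for c in range(n)] for r in range(n)]
-- ===== Notes on version B (the rewrite author's own statement) =====
-- stated objective: faster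
-- what changed: Replaces the loop of O(n) concentric full-subgrid increment sweeps with a single comprehension setting each cell directly to its ring depth min(r, c, n-1-r, n-1-c).
import Mathlib
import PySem

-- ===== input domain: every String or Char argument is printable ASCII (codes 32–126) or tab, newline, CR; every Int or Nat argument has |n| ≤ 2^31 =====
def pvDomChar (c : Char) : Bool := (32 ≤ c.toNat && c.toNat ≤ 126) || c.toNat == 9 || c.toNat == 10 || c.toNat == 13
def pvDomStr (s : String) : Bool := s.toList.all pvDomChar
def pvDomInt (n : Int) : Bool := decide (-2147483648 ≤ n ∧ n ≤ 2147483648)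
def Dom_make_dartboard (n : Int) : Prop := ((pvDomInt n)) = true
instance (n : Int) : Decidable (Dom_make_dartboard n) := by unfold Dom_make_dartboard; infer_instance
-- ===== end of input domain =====

-- B replaces A's O(n) full-subgrid increment sweeps with one comprehension writing each
-- cell's ring depth min(r, c, n-1-r, n-1-c) directly (objective: faster, O(n^2) vs O(n^3)).

-- ===== PORT A =====
-- dartboard[row][column] += 1 : row and column are always in range here, so the
-- toNat-indexed List.modify is exact for Python's in-range nonnegative indexing.
def pvIncCell (b : List (List Int)) (row col : Int) : List (List Int) :=
  b.modify row.toNat (fun r => r.modify col.toNat (· + 1))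

-- one iteration of the while body: the two nested for-loops over range(step, n-step)
def pvStepBody (n s : Int) (b : List (List Int)) : List (List Int) :=
  (PySem.List.pyRange s (n - s) 1).foldl (fun b1 row =>
    (PySem.List.pyRange s (n - s) 1).foldl (fun b2 col => pvIncCell b2 row col) b1) b

-- the while-loop: while step < n - step: … ; step += 1
def pvLoop (n : Int) (b : List (List Int)) (step : Int) : List (List Int) :=
  if step < n - step then pvLoop n (pvStepBody n step b) (step + 1) else b
  termination_by (n - 2 * step).toNat
  decreasing_by omega

def make_dartboard (n : Int) : List (List Int) :=
  -- [[0] * n for _ in range(n)]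
  pvLoop n ((PySem.List.pyRange 0 n 1).map (fun _ => List.replicate n.toNat (0 : Int))) 1

-- ===== PORT B =====
def make_dartboard_alt (n : Int) : List (List Int) :=
  (PySem.List.pyRange 0 n 1).map (fun r =>
    (PySem.List.pyRange 0 n 1).map (fun c => min (min r c) (min (n - 1 - r) (n - 1 - c))))

-- ===== PRECONDITION & SPEC =====
def Spec_make_dartboard (n : Int) (out : List (List Int)) : Prop := out = make_dartboard_alt n
instance (n : Int) (out : List (List Int)) : Decidable (Spec_make_dartboard n out) := by unfold Spec_make_dartboard; infer_instance

-- ===== CLAIM (what is proved, stated in full; the proofs are below) =====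
def Claim_equal_make_dartboard : Prop := ∀ (n : Int), Dom_make_dartboard n → Spec_make_dartboard n (make_dartboard n)

-- ===== LEMMAS AND PROOFS =====

-- the ring depth of cell (r,c)
def pvM (n r c : Int) : Int := min (min r c) (min (n - 1 - r) (n - 1 - c))

-- an n×n grid whose (r,c) entry is f r c
def pvGrid (n : Int) (f : Int → Int → Int) : List (List Int) :=
  (PySem.List.pyRange 0 n 1).map (fun r => (PySem.List.pyRange 0 n 1).map (f r))

lemma pvGrid_congr (n : Int) (f g : Int → Int → Int)
    (h : ∀ r c, 0 ≤ r → r < n → 0 ≤ c → c < n → f r c = g r c) :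
    pvGrid n f = pvGrid n g := by
  unfold pvGrid
  refine List.map_congr_left (fun r hr => ?_)
  rw [PySem.List.mem_pyRange_one] at hr
  exact List.map_congr_left (fun c hc => by
    rw [PySem.List.mem_pyRange_one] at hc
    exact h r c hr.1 hr.2 hc.1 hc.2)

-- modify at an in-range index on a map over pyRange 0 n 1
lemma pvModify_map (n i : Int) (F : Int → α) (G : α → α) (h0 : 0 ≤ i) (h1 : i < n) :
    ((PySem.List.pyRange 0 n 1).map F).modify i.toNat G
      = (PySem.List.pyRange 0 n 1).map (fun x => if x = i then G (F x) else F x) := by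
  apply List.ext_getElem
  · simp [List.length_modify]
  · intro j hj hj'
    simp only [List.length_modify, List.length_map, PySem.List.length_pyRange_one] at hj
    simp [List.getElem_modify, PySem.List.getElem_pyRange_one]
    have : i.toNat = j ↔ (j : Int) = i := by omega
    rcases Decidable.em ((j : Int) = i) with h | h
    · simp [h, this.mpr h]
    · simp [h, (not_congr this).mpr h]

-- the inner for-loop over columns, acting on a row in map form
lemma pvColFold (n a b : Int) (h : Int → Int) (ha : 0 ≤ a) (hb : b ≤ n) :
    (PySem.List.pyRange a b 1).foldl (fun row c => row.modify c.toNat (· + 1))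
        ((PySem.List.pyRange 0 n 1).map h)
      = (PySem.List.pyRange 0 n 1).map (fun x => h x + if a ≤ x ∧ x < b then 1 else 0) := by
  by_cases hab : b ≤ a
  · rw [PySem.List.pyRange_one_eq_nil hab]
    simp only [List.foldl_nil]
    refine List.map_congr_left (fun x hx => ?_)
    rw [PySem.List.mem_pyRange_one] at hx
    have : ¬ (a ≤ x ∧ x < b) := by omega
    simp [this]
  · push_neg at hab
    rw [PySem.List.pyRange_one_cons hab]
    simp only [List.foldl_cons]
    rw [pvModify_map n a h (· + 1) ha (by omega)]
    rw [pvColFold n (a + 1) b _ (by omega) hb]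
    refine List.map_congr_left (fun x hx => ?_)
    rw [PySem.List.mem_pyRange_one] at hx
    split_ifs <;> omega
  termination_by (b - a).toNat
  decreasing_by omega

-- the inner for-loop on the whole board is a single modify of the targeted row
lemma pvFoldl_modify_same (l : List Int) (b : List (List Int)) (i : Nat)
    (g : Int → List Int → List Int) :
    l.foldl (fun b c => b.modify i (g c)) b = b.modify i (fun row => l.foldl (fun r c => g c r) row) := by
  induction l generalizing b with
  | nil =>
      simp only [List.foldl_nil]
      apply List.ext_getElem
      · simp [List.length_modify]
      · intro j hj hj'
        rw [List.getElem_modify]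
        split <;> rfl
  | cons c cs ih =>
      simp only [List.foldl_cons]
      rw [ih]
      apply List.ext_getElem
      · simp [List.length_modify]
      · intro j hj hj'
        rw [List.getElem_modify, List.getElem_modify, List.getElem_modify]
        split <;> rfl

-- the outer for-loop over rows, acting on a board in map form, with the same
-- row-transformer G applied at each visited row
lemma pvRowFold (n a b : Int) (F : Int → List Int) (G : List Int → List Int)
    (ha : 0 ≤ a) (hb : b ≤ n) :
    (PySem.List.pyRange a b 1).foldl (fun brd r => brd.modify r.toNat G)
        ((PySem.List.pyRange 0 n 1).map F)
      = (PySem.List.pyRange 0 n 1).map (fun x => if a ≤ x ∧ x < b then G (F x) else F x) := by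
  by_cases hab : b ≤ a
  · rw [PySem.List.pyRange_one_eq_nil hab]
    simp only [List.foldl_nil]
    refine List.map_congr_left (fun x hx => ?_)
    rw [PySem.List.mem_pyRange_one] at hx
    have : ¬ (a ≤ x ∧ x < b) := by omega
    simp [this]
  · push_neg at hab
    rw [PySem.List.pyRange_one_cons hab]
    simp only [List.foldl_cons]
    rw [pvModify_map n a F G ha (by omega)]
    rw [pvRowFold n (a + 1) b _ G (by omega) hb]
    refine List.map_congr_left (fun x hx => ?_)
    rw [PySem.List.mem_pyRange_one] at hx
    by_cases hxa : x = a
    · subst hxa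
      have h1 : ¬ (x + 1 ≤ x ∧ x < b) := by omega
      have h2 : x ≤ x ∧ x < b := by omega
      simp [h1, h2]
    · have : (if x = a then G (F x) else F x) = F x := by simp [hxa]
      rw [this]
      have : (a + 1 ≤ x ∧ x < b) ↔ (a ≤ x ∧ x < b) := by omega
      simp only [this]
  termination_by (b - a).toNat
  decreasing_by omega

-- one while-body iteration on a grid adds the indicator of the step-s square ring interior
lemma pvStepBody_grid (n s : Int) (f : Int → Int → Int) (hs : 0 ≤ s) :
    pvStepBody n s (pvGrid n f)
      = pvGrid n (fun r c =>
          f r c + if (s ≤ r ∧ r < n - s) ∧ (s ≤ c ∧ c < n - s) then 1 else 0) := by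
  unfold pvStepBody pvGrid
  have hbody : (fun (b1 : List (List Int)) (row : Int) =>
      (PySem.List.pyRange s (n - s) 1).foldl (fun b2 col => pvIncCell b2 row col) b1)
      = (fun b1 row => b1.modify row.toNat
          (fun r => (PySem.List.pyRange s (n - s) 1).foldl (fun r c => r.modify c.toNat (· + 1)) r)) := by
    funext b1 row
    exact pvFoldl_modify_same _ b1 row.toNat (fun col r => r.modify col.toNat (· + 1))
  rw [hbody]
  rw [pvRowFold n s (n - s) _ _ hs (by omega)]
  refine List.map_congr_left (fun r hr => ?_)
  rw [PySem.List.mem_pyRange_one] at hr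
  by_cases hrow : s ≤ r ∧ r < n - s
  · simp only [hrow, if_true]
    rw [pvColFold n s (n - s) (f r) hs (by omega)]
    refine List.map_congr_left (fun c hc => ?_)
    rw [PySem.List.mem_pyRange_one] at hc
    by_cases hcol : s ≤ c ∧ c < n - s
    · simp [hcol]
    · simp [hcol]
  · simp only [hrow, if_false]
    refine List.map_congr_left (fun c hc => ?_)
    have hcc : ¬ ((s ≤ r ∧ r < n - s) ∧ (s ≤ c ∧ c < n - s)) := fun hcc => hrow hcc.1
    simp [hcc]

-- loop invariant: after steps 1..s-1 the cell value is min (s-1) (ring depth)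
lemma pvLoop_grid (n s : Int) (hs : 1 ≤ s) :
    pvLoop n (pvGrid n (fun r c => min (s - 1) (pvM n r c))) s = pvGrid n (pvM n) := by
  rw [pvLoop]
  by_cases h : s < n - s
  · rw [if_pos h]
    rw [pvStepBody_grid n s _ (by omega)]
    have hg : pvGrid n (fun r c =>
        min (s - 1) (pvM n r c) + if (s ≤ r ∧ r < n - s) ∧ (s ≤ c ∧ c < n - s) then 1 else 0)
        = pvGrid n (fun r c => min (s + 1 - 1) (pvM n r c)) := by
      refine pvGrid_congr n _ _ (fun r c h0 h1 h2 h3 => ?_)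
      unfold pvM
      simp only [min_def]
      split_ifs <;> omega
    rw [hg]
    exact pvLoop_grid n (s + 1) (by omega)
  · rw [if_neg h]
    refine pvGrid_congr n _ _ (fun r c h0 h1 h2 h3 => ?_)
    unfold pvM
    simp only [min_def]
    split_ifs <;> omega
  termination_by (n - 2 * s).toNat
  decreasing_by omega

-- the initial board [[0]*n for _ in range(n)] is the s = 1 grid
lemma pvInit_grid (n : Int) :
    (PySem.List.pyRange 0 n 1).map (fun _ => List.replicate n.toNat (0 : Int))
      = pvGrid n (fun r c => min (1 - 1) (pvM n r c)) := by
  have h0 : pvGrid n (fun r c => min (1 - 1) (pvM n r c)) = pvGrid n (fun _ _ => 0) := by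
    refine pvGrid_congr n _ _ (fun r c h0 h1 h2 h3 => ?_)
    unfold pvM
    simp only [min_def]
    split_ifs <;> omega
  rw [h0]
  unfold pvGrid
  refine List.map_congr_left (fun r _ => ?_)
  apply List.ext_getElem
  · simp [PySem.List.length_pyRange_one]
  · intro j hj hj'
    simp

-- ===== VERDICT (by name: the statement is the Claim_ definition above) =====
theorem make_dartboard_spec : Claim_equal_make_dartboard := by
  intro n _
  unfold Spec_make_dartboard make_dartboard
  rw [pvInit_grid n, pvLoop_grid n 1 le_rfl]
  rfl
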